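-- pv_equiv track=rewrite | github.com/JohnSunny21/python-daily-coding | FreeCodeCamp/CodingQ/SpOoKy~CaSe.py | spookify_optimized
-- ===== SOURCE A (Python) =====
-- def spookify_optimized(boo):
--     boo = boo.replace('-','~').replace('_','~')
--     result = ''
--     count = 0
--
--     for char in boo:
--         if char == '~':
--             result += '~'
--         else:
--             if count % 2 == 0:
--                 result += char.upper()
--             else:
--                 result += char.lower()
--             count += 1
--     return result
-- ===== SOURCE B (Python) =====
-- def spookify_optimized(boo):
--     s = boo.replace('-', '~').replace('_', '~')
--     letters = [c for c in s if c != '~']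
--     spooked = [c.upper() if i % 2 == 0 else c.lower() for i, c in enumerate(letters)]
--     it = iter(spooked)
--     return ''.join('~' if c == '~' else next(it) for c in s)
-- ===== Notes on version B (the rewrite author's own statement) =====
-- stated objective: alternative
-- what changed: Replaces the single stateful loop with a running count by an index-based alternation over the extracted non-tilde letters (enumerate comprehension) plus a splice-back pass pulling pre-cased letters from an iterator.
import Mathlib
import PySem

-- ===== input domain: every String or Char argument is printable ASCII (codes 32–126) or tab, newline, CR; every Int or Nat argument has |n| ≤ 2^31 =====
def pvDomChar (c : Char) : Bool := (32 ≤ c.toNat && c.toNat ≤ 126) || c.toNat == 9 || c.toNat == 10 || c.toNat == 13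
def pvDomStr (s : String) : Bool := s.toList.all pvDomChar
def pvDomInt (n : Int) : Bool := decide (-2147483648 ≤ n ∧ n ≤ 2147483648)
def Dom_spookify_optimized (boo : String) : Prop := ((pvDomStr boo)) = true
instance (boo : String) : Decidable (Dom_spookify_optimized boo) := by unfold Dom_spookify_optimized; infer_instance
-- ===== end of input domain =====

-- B replaces A's single stateful counting loop by an enumerate-indexed alternation over the
-- extracted letters plus a splice-back pass (alternative decomposition, same cost).


-- ===== PORT A =====
-- A's loop body: result/count state; strings handled on the List Char side (PySem bridge).
def spookAStep (st : List Char × Int) (char : Char) : List Char × Int :=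
  if char = '~' then (st.1 ++ ['~'], st.2)
  else if st.2 % 2 = 0 then (st.1 ++ [PySem.Chars.upperChar char], st.2 + 1)
  else (st.1 ++ [PySem.Chars.lowerChar char], st.2 + 1)

def spookify_optimized (boo : String) : String :=
  let boo := PySem.Str.replace (PySem.Str.replace boo "-" "~") "_" "~"
  String.mk (boo.toList.foldl spookAStep ([], 0)).1

-- ===== PORT B =====
-- '~' passes through; any other char consumes the next pre-cased letter (next(it);
-- the [] case is unreachable since spooked has exactly one letter per non-tilde char).
def spookSplice : List Char → List Char → List Char
  | [], _ => []
  | c :: rest, sp =>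
    if c = '~' then '~' :: spookSplice rest sp
    else match sp with
      | [] => []
      | x :: xs => x :: spookSplice rest xs

def spookify_optimized_alt (boo : String) : String :=
  let s := PySem.Str.replace (PySem.Str.replace boo "-" "~") "_" "~"
  let letters := s.toList.filter (fun c => c ≠ '~')
  let spooked := (PySem.List.enumerate letters 0).map
    (fun p => if p.1 % 2 = 0 then PySem.Chars.upperChar p.2 else PySem.Chars.lowerChar p.2)
  String.mk (spookSplice s.toList spooked)

-- ===== PRECONDITION & SPEC =====
def Spec_spookify_optimized (boo : String) (out : String) : Prop := out = spookify_optimized_alt boo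
instance (boo : String) (out : String) : Decidable (Spec_spookify_optimized boo out) := by unfold Spec_spookify_optimized; infer_instance

-- ===== CLAIM (what is proved, stated in full; the proofs are below) =====
def Claim_equal_spookify_optimized : Prop := ∀ (boo : String), Dom_spookify_optimized boo → Spec_spookify_optimized boo (spookify_optimized boo)

-- ===== LEMMAS AND PROOFS =====
theorem spook_key (l : List Char) : ∀ (acc : List Char) (cnt : Int),
    (l.foldl spookAStep (acc, cnt)).1 =
      acc ++ spookSplice l ((PySem.List.enumerate (l.filter (fun c => c ≠ '~')) cnt).map
        (fun p => if p.1 % 2 = 0 then PySem.Chars.upperChar p.2 else PySem.Chars.lowerChar p.2)) := by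
  induction l with
  | nil => intro acc cnt; simp [spookSplice]
  | cons c rest ih =>
    intro acc cnt
    by_cases hc : c = '~'
    · subst hc
      simp only [List.foldl_cons, spookAStep, List.filter_cons, spookSplice]
      rw [ih]
      simp
    · simp only [List.foldl_cons, spookAStep, List.filter_cons,
        decide_eq_true_eq, if_pos hc, PySem.List.enumerate_cons, List.map_cons,
        spookSplice, if_neg hc]
      by_cases hp : cnt % 2 = 0
      · rw [if_pos hp, if_pos hp, ih]; simp
      · rw [if_neg hp, if_neg hp, ih]; simp

theorem spookify_optimized_eq (boo : String) :
    spookify_optimized boo = spookify_optimized_alt boo := by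
  show String.mk _ = String.mk _
  rw [spook_key]
  simp

-- ===== VERDICT (by name: the statement is the Claim_ definition above) =====
theorem spookify_optimized_spec : Claim_equal_spookify_optimized := by
  intro boo _
  unfold Spec_spookify_optimized
  exact spookify_optimized_eq boo
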